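-- pv_equiv track=rewrite | github.com/picode98/CMPSC-445-Team-Project-Team-5-Backend | backend-src/inference.py | doc_contains_keywords
-- ===== SOURCE A (Python) =====
-- from typing import List, Iterable, Set, Tuple, Union
--
-- def doc_contains_keywords(tokens: List[str], keywords: List[str], allowed_gap: int) -> bool:
--     lower_keywords = [this_word.lower() for this_word in keywords]
--     lower_tokens = [this_token.lower() for this_token in tokens]
--
--     current_result_candidates = [i for i in range(len(lower_tokens)) if lower_tokens[i] == lower_keywords[0]]
--
--     for current_keyword_index in range(1, len(lower_keywords)):
--         new_candidates = []
--         for this_candidate in current_result_candidates: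
--             next_keyword_index = next(
--                 (i for i in range(this_candidate + 1, min(this_candidate + allowed_gap + 2, len(lower_tokens)))
--                  if lower_tokens[i] == lower_keywords[current_keyword_index]), None
--             )
--
--             if not(next_keyword_index is None):
--                 new_candidates.append(next_keyword_index)
--
--         current_result_candidates = new_candidates
--
--         if len(current_result_candidates) == 0:
--             return False
--
--     return len(current_result_candidates) > 0
-- ===== SOURCE B (Python) =====
-- from bisect import bisect_right
-- from typing import List
--
-- def doc_contains_keywords(tokens: List[str], keywords: List[str], allowed_gap: int) -> bool:
--     # index every lowercased token once: token -> sorted list of its positions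
--     positions = {}
--     for i, tok in enumerate(tokens):
--         positions.setdefault(tok.lower(), []).append(i)
--
--     rest = [kw.lower() for kw in keywords[1:]]
--     for start in positions.get(keywords[0].lower(), []):
--         cur = start
--         ok = True
--         for kw in rest:
--             lst = positions.get(kw, [])
--             j = bisect_right(lst, cur)
--             if j < len(lst) and lst[j] <= cur + allowed_gap + 1:
--                 cur = lst[j]
--             else:
--                 ok = False
--                 break
--         if ok:
--             return True
--     return False
-- ===== Notes on version B (the rewrite author's own statement) =====
-- stated objective: faster
-- what changed: B builds a token->sorted-positions dict once and follows each start's first-match chain by binary search (bisect_right) on that dict, instead of A's per-keyword rescan of a linear token window for every surviving candidate.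
-- outside the precondition, e.g. on doc_contains_keywords([], [], 0): A returns False, B raises IndexError
import Mathlib
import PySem

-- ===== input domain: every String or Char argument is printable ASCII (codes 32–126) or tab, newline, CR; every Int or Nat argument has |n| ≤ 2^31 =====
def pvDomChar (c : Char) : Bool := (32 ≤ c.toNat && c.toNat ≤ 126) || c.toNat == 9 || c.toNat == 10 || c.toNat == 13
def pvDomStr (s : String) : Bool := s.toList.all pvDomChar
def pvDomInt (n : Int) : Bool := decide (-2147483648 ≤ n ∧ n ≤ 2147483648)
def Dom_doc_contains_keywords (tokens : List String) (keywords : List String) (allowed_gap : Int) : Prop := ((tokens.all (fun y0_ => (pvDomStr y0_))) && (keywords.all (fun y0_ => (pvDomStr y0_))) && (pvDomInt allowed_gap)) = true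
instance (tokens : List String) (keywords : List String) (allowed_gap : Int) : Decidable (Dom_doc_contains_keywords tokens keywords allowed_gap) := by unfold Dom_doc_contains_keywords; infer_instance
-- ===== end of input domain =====

-- B replaces A's per-candidate linear window scans by a once-built token->positions index
-- queried with binary search (objective: faster); equivalence proved for nonempty keyword lists.


-- ===== PORT A =====
-- next((i for i in range(this_candidate+1, min(this_candidate+allowed_gap+2, len(lower_tokens)))
--       if lower_tokens[i] == lower_keywords[current_keyword_index]), None)
def pvNextA (lt : List String) (gap : Int) (kw : String) (c : Int) : Option Int :=
  (PySem.List.pyRange (c + 1) (min (c + gap + 2) (PySem.List.len lt)) 1).find?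
    (fun i => PySem.List.pyGetD lt i "" == kw)

-- the 'for current_keyword_index in range(1, len(lower_keywords))' loop, with its early 'return False'
def pvLoopA (lt lk : List String) (gap : Int) : List Int → List Int → Bool
  | [], cands => decide (0 < cands.length)
  | k :: ks, cands =>
    let new := cands.filterMap (fun c => pvNextA lt gap (PySem.List.pyGetD lk k "") c)
    if new.length = 0 then false else pvLoopA lt lk gap ks new

def doc_contains_keywords (tokens : List String) (keywords : List String) (allowed_gap : Int) : Bool :=
  let lower_keywords := keywords.map PySem.Str.lower
  let lower_tokens := tokens.map PySem.Str.lower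
  let current := (PySem.List.pyRange 0 (PySem.List.len lower_tokens) 1).filter
    (fun i => PySem.List.pyGetD lower_tokens i "" == PySem.List.pyGetD lower_keywords 0 "")
  pvLoopA lower_tokens lower_keywords allowed_gap
    (PySem.List.pyRange 1 (PySem.List.len lower_keywords) 1) current

-- ===== PORT B =====
-- the inner 'for kw in rest' chain of Source B: bisect_right then the bound test
def pvChainB (positions : PySem.Dict String (List Int)) (gap : Int) : List String → Int → Bool
  | [], _ => true
  | kw :: ks, cur =>
    let lst := positions.getD kw []
    let j := PySem.List.bisectRight lst cur
    match lst[j]? with                         -- 'j < len(lst)' test plus 'lst[j]'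
    | some p => if p ≤ cur + gap + 1 then pvChainB positions gap ks p else false
    | none => false

def doc_contains_keywords_alt (tokens : List String) (keywords : List String) (allowed_gap : Int) : Bool :=
  -- for i, tok in enumerate(tokens): positions.setdefault(tok.lower(), []).append(i)
  let positions := (PySem.List.enumerate tokens).foldl
    (fun d p => d.modify (PySem.Str.lower p.2) [] (· ++ [p.1])) PySem.Dict.empty
  let rest := (PySem.List.slice keywords (some 1) none).map PySem.Str.lower
  let starts := positions.getD (PySem.Str.lower (PySem.List.pyGetD keywords 0 "")) []
  starts.any (fun s => pvChainB positions allowed_gap rest s)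

-- ===== PRECONDITION & SPEC =====
-- Pre_ excludes empty keyword lists: there A raises IndexError (lower_keywords[0]) whenever tokens
-- is nonempty, and B's keywords[0] raises IndexError always — including the accidental corner
-- tokens = [] where A's comprehension never evaluates lower_keywords[0] and A returns False.
def Pre_doc_contains_keywords (tokens : List String) (keywords : List String) (allowed_gap : Int) : Prop :=
  keywords ≠ []
instance (tokens : List String) (keywords : List String) (allowed_gap : Int) : Decidable (Pre_doc_contains_keywords tokens keywords allowed_gap) := by unfold Pre_doc_contains_keywords; infer_instance

def pvWitness_doc_contains_keywords : List String × List String × Int :=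
  (["Hello", "big", "world"], ["hello", "world"], 1)

def Spec_doc_contains_keywords (tokens : List String) (keywords : List String) (allowed_gap : Int) (out : Bool) : Prop := out = doc_contains_keywords_alt tokens keywords allowed_gap
instance (tokens : List String) (keywords : List String) (allowed_gap : Int) (out : Bool) : Decidable (Spec_doc_contains_keywords tokens keywords allowed_gap out) := by unfold Spec_doc_contains_keywords; infer_instance

-- ===== CLAIM (what is proved, stated in full; the proofs are below) =====
def Claim_equal_doc_contains_keywords : Prop := ∀ (tokens : List String) (keywords : List String) (allowed_gap : Int), Dom_doc_contains_keywords tokens keywords allowed_gap → Pre_doc_contains_keywords tokens keywords allowed_gap → Spec_doc_contains_keywords tokens keywords allowed_gap (doc_contains_keywords tokens keywords allowed_gap)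

-- ===== LEMMAS AND PROOFS =====

-- positions of kw in lt, in increasing order (abstraction both sides are reduced to)
def pvPos (lt : List String) (kw : String) : List Int :=
  (PySem.List.pyRange 0 (PySem.List.len lt) 1).filter (fun i => PySem.List.pyGetD lt i "" == kw)

-- A's per-start greedy chain, keyword list instead of keyword indices
def pvChainA (lt : List String) (gap : Int) : List String → Int → Bool
  | [], _ => true
  | k :: ks, c =>
    match pvNextA lt gap k c with
    | some c' => pvChainA lt gap ks c'
    | none => false

lemma pvPos_mem (lt : List String) (kw : String) (i : Int) :
    i ∈ pvPos lt kw ↔ 0 ≤ i ∧ i < lt.length ∧ PySem.List.pyGetD lt i "" = kw := by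
  simp [pvPos, List.mem_filter, PySem.List.mem_pyRange_one]
  tauto

lemma pvPos_sorted (lt : List String) (kw : String) :
    (pvPos lt kw).Pairwise (· < ·) :=
  List.Pairwise.filter _ (PySem.List.pairwise_lt_pyRange_one 0 _)

lemma pvDict_getD (tokens : List String) (kw : String) :
    ((PySem.List.enumerate tokens).foldl
      (fun d p => d.modify (PySem.Str.lower p.2) [] (· ++ [p.1])) PySem.Dict.empty).getD kw []
    = pvPos (tokens.map PySem.Str.lower) kw := by
  have h1 : ((PySem.List.enumerate tokens).foldl
      (fun d p => d.modify (PySem.Str.lower p.2) [] (· ++ [p.1])) PySem.Dict.empty)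
      = (((PySem.List.enumerate tokens).map (fun p => (PySem.Str.lower p.2, p.1))).foldl
      (fun d q => d.modify q.1 [] (· ++ [q.2])) PySem.Dict.empty) := by
    rw [List.foldl_map]
  rw [h1, PySem.Dict.getD_foldl_modify_append]
  rw [PySem.List.enumerate_eq_map_pyRange tokens ""]
  simp only [List.map_map, List.filter_map, Function.comp_def]
  unfold pvPos
  rw [PySem.Dict.getD_empty, List.nil_append]
  have hlen : PySem.List.len (tokens.map PySem.Str.lower) = PySem.List.len tokens := by
    simp [PySem.List.len_eq]
  rw [hlen, List.map_id_fun']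
  refine List.filter_congr ?_
  intro i hi
  have hdef : PySem.List.pyGetD (tokens.map PySem.Str.lower) i ""
      = PySem.Str.lower (PySem.List.pyGetD tokens i "") := by
    have h := PySem.List.pyGetD_map PySem.Str.lower tokens i ""
    have he : PySem.Str.lower "" = "" := rfl
    rw [he] at h
    exact h
  rw [hdef]

lemma pvFind_none (p : Int → Bool) (a b : Int) (h : ∀ i, a ≤ i → i < b → p i = false) :
    (PySem.List.pyRange a b 1).find? p = none := by
  rw [List.find?_eq_none]
  intro x hx
  rw [PySem.List.mem_pyRange_one] at hx
  simp [h x hx.1 hx.2]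

lemma pvFind_some (p : Int → Bool) : ∀ (n : Nat) (a b q : Int), (q - a).toNat = n → a ≤ q → q < b →
    p q = true → (∀ i, a ≤ i → i < q → p i = false) →
    (PySem.List.pyRange a b 1).find? p = some q := by
  intro n
  induction n with
  | zero =>
    intro a b q hn h1 h2 hq _
    have haq : a = q := by omega
    subst haq
    rw [PySem.List.pyRange_one_cons (lt_of_le_of_lt h1 h2)]
    simp [hq]
  | succ m ih =>
    intro a b q hn h1 h2 hq hmin
    have haq : a < q := by omega
    rw [PySem.List.pyRange_one_cons (lt_trans haq h2)]
    have hpa : p a = false := hmin a le_rfl haq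
    simp only [List.find?_cons, hpa]
    exact ih (a + 1) b q (by omega) (by omega) h2 hq (fun i hi1 hi2 => hmin i (by omega) hi2)

lemma pvStep_eq (lt : List String) (gap : Int) (kw : String) (c : Int) (hc : 0 ≤ c) :
    pvNextA lt gap kw c =
      (match (pvPos lt kw)[PySem.List.bisectRight (pvPos lt kw) c]? with
       | some p => if p ≤ c + gap + 1 then some p else none
       | none => none) := by
  set lst := pvPos lt kw with hlst
  have hsorted : lst.Pairwise (· ≤ ·) := (pvPos_sorted lt kw).imp le_of_lt
  obtain ⟨hjlen, hbelow, habove⟩ := PySem.List.bisectRight_spec lst c hsorted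
  have hlen : PySem.List.len lt = (lt.length : Int) := PySem.List.len_eq lt
  set j := PySem.List.bisectRight lst c with hj
  -- every member of lst greater than c sits at an index ≥ j, hence is ≥ lst[j]
  have hmem_ge : ∀ i ∈ lst, c < i → ∀ (hjl : j < lst.length), lst[j] ≤ i := by
    intro i hi hci hjl
    obtain ⟨idx, hidx, hieq⟩ := List.mem_iff_getElem.mp hi
    by_cases hlt : idx < j
    · have hle := hbelow idx hidx hlt
      rw [hieq] at hle
      omega
    · rcases Nat.lt_or_ge j idx with h | h
      · have hle := List.pairwise_iff_getElem.mp hsorted j idx hjl hidx h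
        rw [hieq] at hle
        exact hle
      · have h1 : lst[j] = lst[idx]'hidx := by
          simp only [show j = idx from by omega]
        rw [hieq] at h1
        exact le_of_eq h1
  cases hget : lst[j]? with
  | none =>
    have hjge : lst.length ≤ j := by
      by_contra hcon
      push Not at hcon
      simp [List.getElem?_eq_getElem hcon] at hget
    -- all elements of lst are ≤ c, so no window index matches
    apply pvFind_none
    intro i hi1 hi2
    by_contra hcon
    simp only [Bool.not_eq_false, beq_iff_eq] at hcon
    have himem : i ∈ lst := by
      rw [hlst, pvPos_mem]
      rw [lt_min_iff, hlen] at hi2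
      exact ⟨by omega, by omega, hcon⟩
    obtain ⟨idx, hidx, hieq⟩ := List.mem_iff_getElem.mp himem
    have hle := hbelow idx hidx (by omega)
    rw [hieq] at hle
    omega
  | some p =>
    have hjl : j < lst.length := by
      by_contra hcon
      push Not at hcon
      simp [List.getElem?_eq_none hcon] at hget
    have hpj : lst[j] = p := by simpa [List.getElem?_eq_getElem hjl] using hget
    have hcp : c < p := hpj ▸ habove j hjl le_rfl
    have hpmem : p ∈ lst := hpj ▸ List.getElem_mem hjl
    rw [hlst, pvPos_mem] at hpmem
    obtain ⟨hp0, hpn, hpkw⟩ := hpmem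
    by_cases hbound : p ≤ c + gap + 1
    · simp only [hbound, if_true]
      apply pvFind_some (n := (p - (c+1)).toNat) _ _ _ _ rfl (by omega)
      · rw [lt_min_iff, hlen]; omega
      · simp [hpkw]
      · intro i hi1 hi2
        by_contra hcon
        simp only [Bool.not_eq_false, beq_iff_eq] at hcon
        have himem : i ∈ lst := by
          rw [hlst, pvPos_mem]
          exact ⟨by omega, by omega, hcon⟩
        have hge := hmem_ge i himem (by omega) hjl
        omega
    · simp only [hbound, if_false]
      apply pvFind_none
      intro i hi1 hi2
      by_contra hcon
      simp only [Bool.not_eq_false, beq_iff_eq] at hcon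
      rw [lt_min_iff, hlen] at hi2
      have himem : i ∈ lst := by
        rw [hlst, pvPos_mem]
        exact ⟨by omega, by omega, hcon⟩
      have hge := hmem_ge i himem (by omega) hjl
      omega

-- the chains agree from any nonnegative start
lemma pvChain_eq (tokens : List String) (gap : Int) (ks : List String) (c : Int) (hc : 0 ≤ c) :
    pvChainA (tokens.map PySem.Str.lower) gap ks c =
      pvChainB ((PySem.List.enumerate tokens).foldl
        (fun d p => d.modify (PySem.Str.lower p.2) [] (· ++ [p.1])) PySem.Dict.empty) gap ks c := by
  induction ks generalizing c with
  | nil => rfl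
  | cons kw ks ih =>
    simp only [pvChainA, pvChainB, pvDict_getD]
    rw [pvStep_eq _ _ _ _ hc]
    set lst := pvPos (tokens.map PySem.Str.lower) kw with hlst
    cases hget : lst[PySem.List.bisectRight lst c]? with
    | none => rfl
    | some p =>
      have hp0 : 0 ≤ p := by
        have hmem : p ∈ lst := List.mem_of_getElem? hget
        rw [hlst, pvPos_mem] at hmem
        exact hmem.1
      by_cases hb : p ≤ c + gap + 1
      · simp only [hb, if_true]
        exact ih p hp0
      · simp only [hb, if_false]

-- A's breadth-first candidate loop is "some start's chain survives"
lemma pvLoopA_eq_any (lt lk : List String) (gap : Int) (ks : List Int) (cands : List Int) :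
    pvLoopA lt lk gap ks cands =
      cands.any (pvChainA lt gap (ks.map (fun k => PySem.List.pyGetD lk k ""))) := by
  induction ks generalizing cands with
  | nil => cases cands <;> simp [pvLoopA, pvChainA]
  | cons k ks ih =>
    show (let new := cands.filterMap (fun c => pvNextA lt gap (PySem.List.pyGetD lk k "") c)
          if new.length = 0 then false else pvLoopA lt lk gap ks new) = _
    have hany : cands.any (pvChainA lt gap ((k :: ks).map (fun k => PySem.List.pyGetD lk k "")))
        = (cands.filterMap (fun c => pvNextA lt gap (PySem.List.pyGetD lk k "") c)).any
            (pvChainA lt gap (ks.map (fun k => PySem.List.pyGetD lk k ""))) := by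
      rw [List.any_filterMap]
      apply PySem.List.any_congr_mem
      intro x _
      rw [List.map_cons]
      simp only [pvChainA]
      cases pvNextA lt gap (PySem.List.pyGetD lk k "") x <;> rfl
    rw [hany]
    set new := cands.filterMap (fun c => pvNextA lt gap (PySem.List.pyGetD lk k "") c) with hnew
    by_cases hlen : new.length = 0
    · have : new = [] := List.length_eq_zero_iff.mp hlen
      simp [this]
    · simp only [hlen, if_false]
      exact ih new

-- ===== VERDICT (by name: the statement is the Claim_ definition above) =====
theorem doc_contains_keywords_spec : Claim_equal_doc_contains_keywords := by
  intro tokens keywords allowed_gap _hdom hpre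
  unfold Spec_doc_contains_keywords
  obtain ⟨k0, krest, hk⟩ : ∃ k0 krest, keywords = k0 :: krest := by
    cases keywords with
    | nil => exact absurd rfl hpre
    | cons a l => exact ⟨a, l, rfl⟩
  subst hk
  show pvLoopA (tokens.map PySem.Str.lower) ((k0 :: krest).map PySem.Str.lower) allowed_gap
      (PySem.List.pyRange 1 (PySem.List.len ((k0 :: krest).map PySem.Str.lower)) 1)
      (pvPos (tokens.map PySem.Str.lower)
        (PySem.List.pyGetD ((k0 :: krest).map PySem.Str.lower) 0 "")) = _
  set lt := tokens.map PySem.Str.lower with hlt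
  set lk := (k0 :: krest).map PySem.Str.lower with hlk
  rw [pvLoopA_eq_any]
  rw [PySem.List.map_pyGetD_pyRange lk "" (by norm_num)]
  show _ = (((PySem.List.enumerate tokens).foldl
      (fun d p => d.modify (PySem.Str.lower p.2) [] (· ++ [p.1])) PySem.Dict.empty).getD
        (PySem.Str.lower (PySem.List.pyGetD (k0 :: krest) 0 "")) []).any
      (fun s => pvChainB _ allowed_gap
        ((PySem.List.slice (k0 :: krest) (some 1) none).map PySem.Str.lower) s)
  rw [pvDict_getD, PySem.List.slice_from_one]
  have hkw0 : PySem.Str.lower (PySem.List.pyGetD (k0 :: krest) 0 "") = PySem.List.pyGetD lk 0 "" := by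
    rw [hlk]
    simp [PySem.List.pyGetD_zero_cons, List.map_cons]
  have htail : (List.tail (k0 :: krest)).map PySem.Str.lower = lk.drop (1 : Int).toNat := by
    rw [hlk]
    simp
  rw [hkw0, htail]
  apply PySem.List.any_congr_mem
  intro s hs
  have hs0 : 0 ≤ s := ((pvPos_mem lt _ s).mp hs).1
  exact pvChain_eq tokens allowed_gap (lk.drop (1 : Int).toNat) s hs0
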